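-- pv_equiv track=rewrite | github.com/TOTO-168/FreePDF | backend/routers/page_numbers.py | format_page_number
-- ===== SOURCE A (Python) =====
-- def format_page_number(fmt: str, current: int, total: int) -> str:
--     if fmt == "page-n":
--         return f"第 {current} 頁"
--     elif fmt == "n-of-total":
--         return f"{current} / {total}"
--     elif fmt == "roman":
--         numerals = [
--             (1000, 'M'), (900, 'CM'), (500, 'D'), (400, 'CD'),
--             (100, 'C'), (90, 'XC'), (50, 'L'), (40, 'XL'),
--             (10, 'X'), (9, 'IX'), (5, 'V'), (4, 'IV'), (1, 'I')
--         ]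
--         result = ''
--         n = current
--         for value, symbol in numerals:
--             while n >= value:
--                 result += symbol
--                 n -= value
--         return result
--     else:
--         return str(current)
-- ===== SOURCE B (Python) =====
-- def format_page_number(fmt: str, current: int, total: int) -> str:
--     if fmt == "page-n":
--         return f"第 {current} 頁"
--     elif fmt == "n-of-total":
--         return f"{current} / {total}"
--     elif fmt == "roman":
--         if current <= 0:
--             return ''
--         ones = ['', 'I', 'II', 'III', 'IV', 'V', 'VI', 'VII', 'VIII', 'IX']
--         tens = ['', 'X', 'XX', 'XXX', 'XL', 'L', 'LX', 'LXX', 'LXXX', 'XC']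
--         hundreds = ['', 'C', 'CC', 'CCC', 'CD', 'D', 'DC', 'DCC', 'DCCC', 'CM']
--         return ('M' * (current // 1000)
--                 + hundreds[current // 100 % 10]
--                 + tens[current // 10 % 10]
--                 + ones[current % 10])
--     else:
--         return str(current)
-- ===== Notes on version B (the rewrite author's own statement) =====
-- stated objective: idiomatic
-- what changed: The roman branch's greedy subtract-while loop over a 13-entry numeral table is replaced by the place-value digit-table method: 'M'*(n//1000) plus direct lookups in ones/tens/hundreds arrays indexed by the decimal digits, with an explicit n<=0 guard returning '' as the greedy loop does.
import Mathlib
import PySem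

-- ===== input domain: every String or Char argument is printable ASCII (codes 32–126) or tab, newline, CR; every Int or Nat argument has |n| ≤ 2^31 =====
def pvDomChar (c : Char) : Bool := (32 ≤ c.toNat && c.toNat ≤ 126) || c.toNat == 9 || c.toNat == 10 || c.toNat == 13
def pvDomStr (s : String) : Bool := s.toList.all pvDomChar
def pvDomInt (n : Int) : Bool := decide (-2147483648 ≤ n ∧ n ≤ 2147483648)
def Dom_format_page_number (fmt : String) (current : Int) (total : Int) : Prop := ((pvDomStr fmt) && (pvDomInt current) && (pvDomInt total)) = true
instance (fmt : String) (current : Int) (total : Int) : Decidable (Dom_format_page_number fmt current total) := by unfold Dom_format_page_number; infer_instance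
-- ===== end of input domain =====

-- B replaces A's greedy roman-numeral subtraction loop by the place-value digit-table method (idiomatic; same results).

-- ===== PORT A =====
-- inner 'while n >= value: result += symbol; n -= value' loop of A's roman branch
-- (the '0 < v' conjunct in the guard only makes the loop total; every value in A's table is positive,
--  and for 0 < v the guard is exactly Python's 'n >= value')
def pvWhile (v : Int) (s : List Char) (n : Int) (acc : List Char) : List Char × Int :=
  if _h : 0 < v ∧ v ≤ n then pvWhile v s (n - v) (acc ++ s) else (acc, n)
termination_by n.toNat
decreasing_by omega

-- the 'for value, symbol in numerals' loop
def pvChain : List (Int × List Char) → List Char → Int → List Char × Int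
  | [], acc, n => (acc, n)
  | (v, s) :: rest, acc, n =>
    let p := pvWhile v s n acc
    pvChain rest p.1 p.2

def pvNumerals : List (Int × List Char) :=
  [(1000, ['M']), (900, ['C','M']), (500, ['D']), (400, ['C','D']),
   (100, ['C']), (90, ['X','C']), (50, ['L']), (40, ['X','L']),
   (10, ['X']), (9, ['I','X']), (5, ['V']), (4, ['I','V']), (1, ['I'])]

def format_page_number (fmt : String) (current : Int) (total : Int) : String :=
  if fmt == "page-n" then "第 " ++ PySem.Int.toStr current ++ " 頁"
  else if fmt == "n-of-total" then PySem.Int.toStr current ++ " / " ++ PySem.Int.toStr total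
  else if fmt == "roman" then String.ofList (pvChain pvNumerals [] current).1
  else PySem.Int.toStr current

-- ===== PORT B =====
def pvOnes : List (List Char) :=
  [[], ['I'], ['I','I'], ['I','I','I'], ['I','V'], ['V'], ['V','I'], ['V','I','I'], ['V','I','I','I'], ['I','X']]
def pvTens : List (List Char) :=
  [[], ['X'], ['X','X'], ['X','X','X'], ['X','L'], ['L'], ['L','X'], ['L','X','X'], ['L','X','X','X'], ['X','C']]
def pvHundreds : List (List Char) :=
  [[], ['C'], ['C','C'], ['C','C','C'], ['C','D'], ['D'], ['D','C'], ['D','C','C'], ['D','C','C','C'], ['C','M']]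

-- 'hundreds[i]' etc. is ported with getD: the indices are '… % 10' of a positive int, always in range,
-- so getD is exact where Source B indexes.
def format_page_number_alt (fmt : String) (current : Int) (total : Int) : String :=
  if fmt == "page-n" then "第 " ++ PySem.Int.toStr current ++ " 頁"
  else if fmt == "n-of-total" then PySem.Int.toStr current ++ " / " ++ PySem.Int.toStr total
  else if fmt == "roman" then
    if current ≤ 0 then ""
    else String.ofList
      (PySem.List.pyRepeat ['M'] (PySem.Int.floordiv current 1000)
        ++ pvHundreds.getD (PySem.Int.mod (PySem.Int.floordiv current 100) 10).toNat []
        ++ pvTens.getD (PySem.Int.mod (PySem.Int.floordiv current 10) 10).toNat []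
        ++ pvOnes.getD (PySem.Int.mod current 10).toNat [])
  else PySem.Int.toStr current

-- ===== PRECONDITION & SPEC =====
def Spec_format_page_number (fmt : String) (current : Int) (total : Int) (out : String) : Prop := out = format_page_number_alt fmt current total
instance (fmt : String) (current : Int) (total : Int) (out : String) : Decidable (Spec_format_page_number fmt current total out) := by unfold Spec_format_page_number; infer_instance

-- ===== CLAIM (what is proved, stated in full; the proofs are below) =====
def Claim_equal_format_page_number : Prop := ∀ (fmt : String) (current : Int) (total : Int), Dom_format_page_number fmt current total → Spec_format_page_number fmt current total (format_page_number fmt current total)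

-- ===== LEMMAS AND PROOFS =====

theorem pvWhile_stop (v : Int) (s : List Char) (n : Int) (acc : List Char) (h : n < v) :
    pvWhile v s n acc = (acc, n) := by
  rw [pvWhile, dif_neg (by omega : ¬(0 < v ∧ v ≤ n))]

theorem pvWhile_step (v : Int) (s : List Char) (n : Int) (acc : List Char)
    (hv : 0 < v) (h : v ≤ n) :
    pvWhile v s n acc = pvWhile v s (n - v) (acc ++ s) := by
  conv_lhs => rw [pvWhile]
  rw [dif_pos ⟨hv, h⟩]

theorem pyRepeat_pred (s : List Char) (k : Int) (hk : 1 ≤ k) :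
    PySem.List.pyRepeat s k = s ++ PySem.List.pyRepeat s (k - 1) := by
  simp only [PySem.List.pyRepeat]
  rw [show k.toNat = (k - 1).toNat + 1 by omega, List.replicate_succ, List.flatten_cons]

theorem pvWhile_eq (v : Int) (s : List Char) (hv : 0 < v) :
    ∀ (k : Nat) (n : Int) (acc : List Char), 0 ≤ n → n.toNat ≤ k →
    pvWhile v s n acc = (acc ++ PySem.List.pyRepeat s (n / v), n % v) := by
  intro k
  induction k with
  | zero =>
    intro n acc h0 hk
    have hd0 : n / v = 0 := Int.ediv_eq_zero_of_lt h0 (by omega)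
    have hm0 : n % v = n := Int.emod_eq_of_lt h0 (by omega)
    rw [pvWhile_stop _ _ _ _ (by omega), hd0, hm0]
    simp [PySem.List.pyRepeat]
  | succ k ih =>
    intro n acc h0 hk
    by_cases h : v ≤ n
    · rw [pvWhile_step _ _ _ _ hv h, ih (n - v) (acc ++ s) (by omega) (by omega)]
      have hdiv : (n - v) / v = n / v + (-1) := by
        rw [show n - v = n + (-1) * v by ring, Int.add_mul_ediv_right _ _ (by omega : v ≠ 0)]
      have hmod : (n - v) % v = n % v := by
        rw [show n - v = n + (-1) * v by ring, Int.add_mul_emod_self_right]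
      have hq1 : 1 ≤ n / v := by
        rw [Int.le_ediv_iff_mul_le hv]; omega
      rw [hdiv, hmod, pyRepeat_pred s (n / v) hq1]
      simp [List.append_assoc, sub_eq_add_neg]
    · have hd0 : n / v = 0 := Int.ediv_eq_zero_of_lt h0 (by omega)
      have hm0 : n % v = n := Int.emod_eq_of_lt h0 (by omega)
      rw [pvWhile_stop _ _ _ _ (by omega), hd0, hm0]
      simp [PySem.List.pyRepeat]

theorem pvChain_cons_step (v : Int) (s : List Char) (rest : List (Int × List Char))
    (acc : List Char) (n : Int) (hv : 0 < v) (h : v ≤ n) :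
    pvChain ((v, s) :: rest) acc n = pvChain ((v, s) :: rest) (acc ++ s) (n - v) := by
  simp only [pvChain]
  rw [pvWhile_step _ _ _ _ hv h]

theorem pvChain_cons_stop (v : Int) (s : List Char) (rest : List (Int × List Char))
    (acc : List Char) (n : Int) (h : n < v) :
    pvChain ((v, s) :: rest) acc n = pvChain rest acc n := by
  simp only [pvChain]
  rw [pvWhile_stop _ _ _ _ h]

theorem pvChain_cons_run (v : Int) (s : List Char) (rest : List (Int × List Char))
    (acc : List Char) (n : Int) (hv : 0 < v) (hn : 0 ≤ n) :
    pvChain ((v, s) :: rest) acc n = pvChain rest (acc ++ PySem.List.pyRepeat s (n / v)) (n % v) := by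
  simp only [pvChain]
  rw [pvWhile_eq v s hv n.toNat n acc hn le_rfl]

theorem pvChain_nonpos (l : List (Int × List Char)) (acc : List Char) (n : Int)
    (hn : n ≤ 0) (hl : ∀ p ∈ l, 0 < p.1) :
    pvChain l acc n = (acc, n) := by
  induction l with
  | nil => rfl
  | cons p rest ih =>
    obtain ⟨v, s⟩ := p
    rw [pvChain_cons_stop _ _ _ _ _ (by have := hl (v, s) List.mem_cons_self; simpa using by omega)]
    exact ih fun q hq => hl q (List.mem_cons_of_mem _ hq)

theorem pvGroup100 (d t : Int) (rest : List (Int × List Char)) (acc : List Char)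
    (hd : 0 ≤ d) (hd9 : d < 10) (ht : 0 ≤ t) (htu : t < 100) :
    pvChain ((900, ['C','M']) :: (500, ['D']) :: (400, ['C','D']) :: (100, ['C']) :: rest)
        acc (100 * d + t)
      = pvChain rest (acc ++ pvHundreds.getD d.toNat []) t := by
  interval_cases d <;>
    (repeat first
      | rw [pvChain_cons_step _ _ _ _ _ (by omega) (by omega)]
      | rw [pvChain_cons_stop _ _ _ _ _ (by omega)]) <;>
    (congr 1 <;> first | omega | simp [pvHundreds])

theorem pvGroup10 (d t : Int) (rest : List (Int × List Char)) (acc : List Char)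
    (hd : 0 ≤ d) (hd9 : d < 10) (ht : 0 ≤ t) (htu : t < 10) :
    pvChain ((90, ['X','C']) :: (50, ['L']) :: (40, ['X','L']) :: (10, ['X']) :: rest)
        acc (10 * d + t)
      = pvChain rest (acc ++ pvTens.getD d.toNat []) t := by
  interval_cases d <;>
    (repeat first
      | rw [pvChain_cons_step _ _ _ _ _ (by omega) (by omega)]
      | rw [pvChain_cons_stop _ _ _ _ _ (by omega)]) <;>
    (congr 1 <;> first | omega | simp [pvTens])

theorem pvGroup1 (d : Int) (acc : List Char)
    (hd : 0 ≤ d) (hd9 : d < 10) :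
    pvChain [(9, ['I','X']), (5, ['V']), (4, ['I','V']), (1, ['I'])] acc d
      = (acc ++ pvOnes.getD d.toNat [], 0) := by
  interval_cases d <;>
    (repeat first
      | rw [pvChain_cons_step _ _ _ _ _ (by omega) (by omega)]
      | rw [pvChain_cons_stop _ _ _ _ _ (by omega)]) <;>
    (simp only [pvChain]) <;>
    (congr 1 <;> first | omega | simp [pvOnes])

theorem pvRoman_eq (n : Int) (hn : 0 ≤ n) :
    (pvChain pvNumerals [] n).1
      = PySem.List.pyRepeat ['M'] (n / 1000)
        ++ pvHundreds.getD ((n / 100) % 10).toNat []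
        ++ pvTens.getD ((n / 10) % 10).toNat []
        ++ pvOnes.getD (n % 10).toNat [] := by
  show (pvChain ((1000, ['M']) :: _) [] n).1 = _
  rw [pvChain_cons_run _ _ _ _ _ (by omega) hn]
  rw [show n % 1000 = 100 * ((n % 1000) / 100) + (n % 1000) % 100 by omega]
  rw [pvGroup100 _ _ _ _ (by omega) (by omega) (by omega) (by omega)]
  rw [show (n % 1000) % 100 = 10 * (((n % 1000) % 100) / 10) + ((n % 1000) % 100) % 10 by omega]
  rw [pvGroup10 _ _ _ _ (by omega) (by omega) (by omega) (by omega)]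
  rw [pvGroup1 _ _ (by omega) (by omega)]
  rw [show (n % 1000) / 100 = (n / 100) % 10 by omega,
    show ((n % 1000) % 100) / 10 = (n / 10) % 10 by omega,
    show ((n % 1000) % 100) % 10 = n % 10 by omega]
  simp [List.append_assoc]

-- ===== VERDICT (by name: the statement is the Claim_ definition above) =====
theorem format_page_number_spec : Claim_equal_format_page_number := by
  unfold Claim_equal_format_page_number
  intro fmt current total _
  unfold Spec_format_page_number format_page_number format_page_number_alt
  by_cases h1 : fmt == "page-n"
  · simp [h1]
  by_cases h2 : fmt == "n-of-total"
  · simp [h1, h2]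
  by_cases h3 : fmt == "roman"
  swap
  · simp [h1, h2, h3]
  simp only [h1, h2, h3, if_true, if_false, Bool.false_eq_true]
  by_cases hc : current ≤ 0
  · rw [if_pos hc, pvChain_nonpos pvNumerals [] current hc (by decide)]
  · rw [if_neg hc, pvRoman_eq current (by omega)]
    rw [PySem.Int.floordiv_eq_ediv_of_pos (by norm_num), PySem.Int.floordiv_eq_ediv_of_pos (by norm_num),
      PySem.Int.floordiv_eq_ediv_of_pos (by norm_num),
      PySem.Int.mod_eq_emod_of_pos (by norm_num), PySem.Int.mod_eq_emod_of_pos (by norm_num),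
      PySem.Int.mod_eq_emod_of_pos (by norm_num)]
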